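-- pv_equiv track=rewrite | github.com/nickforbesy/Petal-Braids | petalbraid_starter/src/petalbraid/converters.py | _wave_indices
-- ===== SOURCE A (Python) =====
-- def _wave_indices(num_crossings: int, num_strands: int) -> tuple[int, ...]:
--     """Return indices like 1,2,...,m,m-1,...,1,2,... with m=num_strands-1."""
--     max_gen = num_strands - 1
--     if max_gen <= 0 or num_crossings <= 0:
--         return ()
--
--     if max_gen == 1:
--         return (1,) * num_crossings
--
--     one_period = tuple(range(1, max_gen + 1)) + tuple(range(max_gen - 1, 0, -1))
--     out: list[int] = []
--     while len(out) < num_crossings: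
--         out.extend(one_period)
--     return tuple(out[:num_crossings])
-- ===== SOURCE B (Python) =====
-- def _wave_indices(num_crossings: int, num_strands: int) -> tuple[int, ...]:
--     """Return indices like 1,2,...,m,m-1,...,1,2,... with m=num_strands-1."""
--     max_gen = num_strands - 1
--     if max_gen <= 0 or num_crossings <= 0:
--         return ()
--     period = 2 * max_gen - 1
--
--     def tri(i: int) -> int:
--         r = i % period
--         return r + 1 if r < max_gen else period - r
--
--     return tuple(tri(i) for i in range(num_crossings))
-- ===== Notes on version B (the rewrite author's own statement) =====
-- stated objective: faster
-- what changed: Replaces building a one-period tuple and repeatedly extending a list until it is long enough (then truncating) with a direct closed-form triangle-wave map i -> value computed per index from i % (2*max_gen-1).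
import Mathlib
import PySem

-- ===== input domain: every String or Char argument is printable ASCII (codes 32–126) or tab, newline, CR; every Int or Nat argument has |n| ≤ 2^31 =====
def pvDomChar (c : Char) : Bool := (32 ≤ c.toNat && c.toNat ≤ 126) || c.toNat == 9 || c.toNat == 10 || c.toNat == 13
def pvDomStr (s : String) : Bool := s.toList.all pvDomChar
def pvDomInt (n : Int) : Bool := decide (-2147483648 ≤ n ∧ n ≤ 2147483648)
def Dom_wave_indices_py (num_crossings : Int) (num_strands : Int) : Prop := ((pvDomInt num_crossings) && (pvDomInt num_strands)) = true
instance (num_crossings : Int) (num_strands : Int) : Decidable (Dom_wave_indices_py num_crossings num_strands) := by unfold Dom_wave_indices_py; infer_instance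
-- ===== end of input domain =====

-- B replaces A's build-a-period-then-extend-and-truncate loop with a per-index
-- closed-form triangle-wave map (objective: faster by a constant factor, no
-- intermediate over-long list).

-- ===== PORT A =====
-- 'while len(out) < num_crossings: out.extend(one_period)'; the length guard on
-- the period list only makes the recursion total (at the call site it is nonempty).
def pvExtendLoop (one_period : List Int) (n : Nat) (out : List Int) : List Int :=
  if _h : 0 < one_period.length ∧ out.length < n then
    pvExtendLoop one_period n (out ++ one_period)
  else out
termination_by n - out.length
decreasing_by simp only [List.length_append]; omega

def wave_indices_py (num_crossings : Int) (num_strands : Int) : List Int :=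
  let max_gen := num_strands - 1
  if max_gen ≤ 0 ∨ num_crossings ≤ 0 then []
  else if max_gen = 1 then List.replicate num_crossings.toNat 1
  else
    let one_period :=
      PySem.List.pyRange 1 (max_gen + 1) 1 ++ PySem.List.pyRange (max_gen - 1) 0 (-1)
    (pvExtendLoop one_period num_crossings.toNat []).take num_crossings.toNat

-- ===== PORT B =====
def wave_indices_py_alt (num_crossings : Int) (num_strands : Int) : List Int :=
  let max_gen := num_strands - 1
  if max_gen ≤ 0 ∨ num_crossings ≤ 0 then []
  else
    let period := 2 * max_gen - 1
    (PySem.List.pyRange 0 num_crossings 1).map (fun i =>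
      let r := PySem.Int.mod i period
      if r < max_gen then r + 1 else period - r)

-- ===== PRECONDITION & SPEC =====
def Spec_wave_indices_py (num_crossings : Int) (num_strands : Int) (out : List Int) : Prop := out = wave_indices_py_alt num_crossings num_strands
instance (num_crossings : Int) (num_strands : Int) (out : List Int) : Decidable (Spec_wave_indices_py num_crossings num_strands out) := by unfold Spec_wave_indices_py; infer_instance

-- ===== CLAIM (what is proved, stated in full; the proofs are below) =====
def Claim_equal_wave_indices_py : Prop := ∀ (num_crossings : Int) (num_strands : Int), Dom_wave_indices_py num_crossings num_strands → Spec_wave_indices_py num_crossings num_strands (wave_indices_py num_crossings num_strands)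

-- ===== LEMMAS AND PROOFS =====

-- the loop never stops before reaching length n (given a nonempty period)
theorem pvExtendLoop_len (q : List Int) (hq : 0 < q.length) :
    ∀ (n : Nat) (out : List Int), n ≤ (pvExtendLoop q n out).length := by
  intro n out
  induction out using (fun out => pvExtendLoop.induct q n out) with
  | case1 out h ih => rw [pvExtendLoop, dif_pos h]; exact ih
  | case2 out h =>
      rw [pvExtendLoop, dif_neg h]
      omega

-- loop invariant: the accumulated list is periodic with period q
theorem pvExtendLoop_getD (q : List Int) (n : Nat) (out : List Int)
    (hdvd : q.length ∣ out.length)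
    (hper : ∀ i, i < out.length → out.getD i 0 = q.getD (i % q.length) 0) :
    q.length ∣ (pvExtendLoop q n out).length ∧
    ∀ i, i < (pvExtendLoop q n out).length →
      (pvExtendLoop q n out).getD i 0 = q.getD (i % q.length) 0 := by
  induction out using (fun out => pvExtendLoop.induct q n out) with
  | case1 out h ih =>
      rw [pvExtendLoop, dif_pos h]
      apply ih
      · simp only [List.length_append]; exact Dvd.dvd.add hdvd (dvd_refl _)
      · intro i hi
        simp only [List.length_append] at hi
        by_cases hlt : i < out.length
        · rw [List.getD_append _ _ _ _ hlt]; exact hper i hlt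
        · have h1 : out.length ≤ i := by omega
          rw [List.getD_append_right _ _ _ _ h1]
          have h2 : i - out.length < q.length := by omega
          have hm : i % q.length = i - out.length := by
            obtain ⟨c, hc⟩ := hdvd
            have h3 : i = q.length * c + (i - out.length) := by omega
            calc i % q.length = (q.length * c + (i - out.length)) % q.length := by
                  rw [← h3]
              _ = (i - out.length) % q.length := Nat.mul_add_mod _ _ _
              _ = i - out.length := Nat.mod_eq_of_lt h2
          rw [hm]
  | case2 out h =>
      rw [pvExtendLoop, dif_neg h]
      exact ⟨hdvd, hper⟩

-- the truncated loop output, elementwise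
theorem pvExtendLoop_take (q : List Int) (hq : 0 < q.length) (n : Nat) :
    (pvExtendLoop q n []).take n = (List.range n).map (fun k => q.getD (k % q.length) 0) := by
  have hlen := pvExtendLoop_len q hq n []
  have hget := (pvExtendLoop_getD q n [] (dvd_zero _) (by intro i hi; simp at hi)).2
  apply List.ext_getElem
  · simp; omega
  · intro i h1 h2
    have hi : i < n := by simpa using h2
    have hiE : i < (pvExtendLoop q n []).length := by omega
    rw [List.getElem_take, List.getElem_map, List.getElem_range,
        ← List.getD_eq_getElem _ 0 hiE, hget i hiE]

-- the hand-built period list is the triangle wave on one period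
theorem one_period_eq (m : Int) (hm : 1 ≤ m) :
    PySem.List.pyRange 1 (m + 1) 1 ++ PySem.List.pyRange (m - 1) 0 (-1)
      = (List.range (2 * m - 1).toNat).map
          (fun (r : Nat) => if (r : Int) < m then (r : Int) + 1 else 2 * m - 1 - (r : Int)) := by
  apply List.ext_getElem
  · simp [PySem.List.length_pyRange_one, PySem.List.length_pyRange_neg_one]; omega
  · intro i h1 h2
    simp only [List.getElem_map, List.getElem_range]
    have hlen1 : (PySem.List.pyRange 1 (m + 1) 1).length = m.toNat := by
      rw [PySem.List.length_pyRange_one]; omega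
    by_cases hlt : i < m.toNat
    · rw [List.getElem_append_left (by omega)]
      rw [PySem.List.getElem_pyRange_one]
      have hcast : (i : Int) < m := by omega
      simp only [hcast, if_pos]
      ring
    · rw [List.getElem_append_right (by omega)]
      have hi2 : i - (PySem.List.pyRange 1 (m + 1) 1).length < (m - 1).toNat := by
        simp only [List.length_append, hlen1, PySem.List.length_pyRange_neg_one] at h1 ⊢
        omega
      simp only [PySem.List.pyRange_neg_one, List.getElem_map, List.getElem_range]
      have hge : ¬ ((i : Int) < m) := by omega
      simp only [hge, if_false, hlen1]
      have hcast : ((i - m.toNat : Nat) : Int) = (i : Int) - m := by omega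
      rw [hcast]; ring

-- ===== VERDICT (by name: the statement is the Claim_ definition above) =====
theorem wave_indices_py_spec : Claim_equal_wave_indices_py := by
  intro nc ns _
  unfold Spec_wave_indices_py wave_indices_py wave_indices_py_alt
  simp only []
  by_cases hguard : ns - 1 ≤ 0 ∨ nc ≤ 0
  · rw [if_pos hguard, if_pos hguard]
  · rw [if_neg hguard, if_neg hguard]
    push_neg at hguard
    obtain ⟨hm, hnc⟩ := hguard
    set m : Int := ns - 1 with hmdef
    have hm1 : 1 ≤ m := by omega
    have hNcast : ((nc.toNat : Int)) = nc := by omega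
    -- B's list, rewritten over List.range
    have hB : (PySem.List.pyRange 0 nc 1).map (fun i =>
        let r := PySem.Int.mod i (2 * m - 1)
        if r < m then r + 1 else 2 * m - 1 - r)
        = (List.range nc.toNat).map (fun k =>
            let r := ((k % (2 * m - 1).toNat : Nat) : Int)
            if r < m then r + 1 else 2 * m - 1 - r) := by
      rw [PySem.List.pyRange_one]
      simp only [sub_zero, List.map_map]
      apply List.map_congr_left
      intro k _
      simp only [Function.comp_apply, zero_add]
      have hP : (2 * m - 1 : Int) = ((2 * m - 1).toNat : Nat) := by omega
      have : PySem.Int.mod (k : Int) (2 * m - 1) = ((k % (2 * m - 1).toNat : Nat) : Int) := by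
        rw [hP]; exact PySem.Int.mod_natCast k (2 * m - 1).toNat
      rw [this]
    by_cases hm2 : m = 1
    · -- max_gen == 1 branch of A
      rw [if_pos hm2, hB, hm2]
      apply List.ext_getElem
      · simp
      · intro i h1 h2
        simp [List.getElem_replicate, Nat.mod_one]
    · rw [if_neg hm2]
      have hm2' : 2 ≤ m := by omega
      set q := PySem.List.pyRange 1 (m + 1) 1 ++ PySem.List.pyRange (m - 1) 0 (-1) with hq
      have hqlen : q.length = (2 * m - 1).toNat := by
        simp [hq, PySem.List.length_pyRange_one, PySem.List.length_pyRange_neg_one]; omega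
      have hq0 : 0 < q.length := by omega
      rw [pvExtendLoop_take q hq0, hB]
      apply List.map_congr_left
      intro k hk
      have hkP : k % (2 * m - 1).toNat < (2 * m - 1).toNat := Nat.mod_lt _ (by omega)
      rw [hqlen, hq, one_period_eq m hm1]
      rw [List.getD_eq_getElem _ 0 (by simpa using hkP)]
      simp only [List.getElem_map, List.getElem_range]
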